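-- pv_equiv track=rewrite | github.com/tsmztech/sf_agents | tools/salesforce_tool.py | _extract_object_name
-- ===== SOURCE A (Python) =====
-- def _extract_object_name(query: str) -> str:
--     """Extract object name from query string."""
--     # Simple extraction logic - can be improved
--     words = query.split()
--
--     # Look for common Salesforce object patterns
--     for word in words:
--         if word.endswith('__c') or word in ['Contact', 'Account', 'Case', 'Opportunity', 'Lead', 'User']:
--             return word
--
--     # Look for words that might be object names (capitalized)
--     for word in words:
--         if word[0].isupper() and len(word) > 2:
--             return word
--
--     return None
-- ===== SOURCE B (Python) =====
-- KNOWN_OBJECTS = ['Contact', 'Account', 'Case', 'Opportunity', 'Lead', 'User']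
--
-- def _extract_object_name(query: str) -> str:
--     """Single pass: return first known/__c word immediately; remember first
--     capitalized candidate as a fallback."""
--     fallback = None
--     for word in query.split():
--         if word.endswith('__c') or word in KNOWN_OBJECTS:
--             return word
--         if fallback is None and word[0].isupper() and len(word) > 2:
--             fallback = word
--     return fallback
-- ===== Notes on version B (the rewrite author's own statement) =====
-- stated objective: alternative
-- what changed: Merged A's two sequential scans of the word list into a single loop that returns a pattern/known-object match immediately and records the first capitalized word as a fallback variable.
import Mathlib
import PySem

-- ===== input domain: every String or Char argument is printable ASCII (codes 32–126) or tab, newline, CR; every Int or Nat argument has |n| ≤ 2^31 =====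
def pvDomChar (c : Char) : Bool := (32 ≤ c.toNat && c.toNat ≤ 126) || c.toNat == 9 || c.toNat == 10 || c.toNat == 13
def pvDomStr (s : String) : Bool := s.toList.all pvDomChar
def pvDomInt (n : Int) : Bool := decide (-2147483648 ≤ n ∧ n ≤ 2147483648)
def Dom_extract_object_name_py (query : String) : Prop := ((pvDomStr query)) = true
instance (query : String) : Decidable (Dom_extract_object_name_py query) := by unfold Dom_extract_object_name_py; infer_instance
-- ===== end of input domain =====

-- B merges A's two sequential scans into one pass with a fallback accumulator; same return value, objective: alternative decomposition.

-- ===== PORT A =====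
-- shared word predicates (the literal conditions both Pythons test on a word)
def pvKnownObjects : List String := ["Contact", "Account", "Case", "Opportunity", "Lead", "User"]

def pvIsType1 (w : String) : Bool :=
  PySem.Str.endswith w "__c" || pvKnownObjects.contains w

-- word[0].isupper() and len(word) > 2; words from split() are nonempty, so the
-- 'none' branch of pyGet? (Python's IndexError) is unreachable
def pvIsCap (w : String) : Bool :=
  (match PySem.Str.pyGet? w 0 with
   | some c => PySem.Chars.isupper c
   | none => false) && decide (PySem.Str.len w > 2)

-- first for-loop of A
def pvPassA1 : List String → Option String
  | [] => none
  | w :: ws => if pvIsType1 w then some w else pvPassA1 ws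

-- second for-loop of A
def pvPassA2 : List String → Option String
  | [] => none
  | w :: ws => if pvIsCap w then some w else pvPassA2 ws

def extract_object_name_py (query : String) : Option String :=
  let words := PySem.Str.split₀ query
  match pvPassA1 words with
  | some w => some w
  | none => pvPassA2 words

-- ===== PORT B =====
-- B's single loop with the fallback variable
def pvLoopB : List String → Option String → Option String
  | [], fallback => fallback
  | w :: ws, fallback =>
    if pvIsType1 w then some w
    else pvLoopB ws (if fallback.isNone && pvIsCap w then some w else fallback)

def extract_object_name_py_alt (query : String) : Option String :=
  pvLoopB (PySem.Str.split₀ query) none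

-- ===== PRECONDITION & SPEC =====
def Spec_extract_object_name_py (query : String) (out : Option String) : Prop := out = extract_object_name_py_alt query
instance (query : String) (out : Option String) : Decidable (Spec_extract_object_name_py query out) := by unfold Spec_extract_object_name_py; infer_instance

-- ===== CLAIM (what is proved, stated in full; the proofs are below) =====
def Claim_equal_extract_object_name_py : Prop := ∀ (query : String), Dom_extract_object_name_py query → Spec_extract_object_name_py query (extract_object_name_py query)

-- ===== LEMMAS AND PROOFS =====
theorem pvLoopB_eq (ws : List String) (fb : Option String) :
    pvLoopB ws fb =
      match pvPassA1 ws with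
      | some w => some w
      | none => match fb with
                | some f => some f
                | none => pvPassA2 ws := by
  induction ws generalizing fb with
  | nil => cases fb <;> simp [pvLoopB, pvPassA1, pvPassA2]
  | cons w ws ih =>
    by_cases h1 : pvIsType1 w
    · simp [pvLoopB, pvPassA1, h1]
    · cases fb with
      | some f => simp [pvLoopB, pvPassA1, h1, ih]
      | none =>
        by_cases h2 : pvIsCap w
        · simp [pvLoopB, pvPassA1, pvPassA2, h1, h2, ih]
        · simp [pvLoopB, pvPassA1, pvPassA2, h1, h2, ih]

-- ===== VERDICT (by name: the statement is the Claim_ definition above) =====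
theorem extract_object_name_py_spec : Claim_equal_extract_object_name_py := by
  intro query _
  unfold Spec_extract_object_name_py extract_object_name_py extract_object_name_py_alt
  rw [pvLoopB_eq]
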